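-- pv_equiv track=rewrite | github.com/ErikBergman/saol_diff_list | poc_hvarfor_varfor_korp.py | year_chunks
-- ===== SOURCE A (Python) =====
-- from typing import Dict, Iterable, List, Optional, Tuple
--
-- def year_chunks(from_year: int, to_year: int, chunk_years: int) -> List[Tuple[int, int]]:
--     if chunk_years <= 0:
--         raise ValueError("--chunk-years must be > 0")
--     chunks: List[Tuple[int, int]] = []
--     start = from_year
--     while start <= to_year:
--         end = min(start + chunk_years - 1, to_year)
--         chunks.append((start, end))
--         start = end + 1
--     return chunks
-- ===== SOURCE B (Python) =====
-- from typing import List, Tuple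
--
-- def year_chunks(from_year: int, to_year: int, chunk_years: int) -> List[Tuple[int, int]]:
--     if chunk_years <= 0:
--         raise ValueError("--chunk-years must be > 0")
--     total = to_year - from_year + 1
--     if total <= 0:
--         return []
--     n = -(-total // chunk_years)  # ceiling division: number of chunks
--     full = [(from_year + i * chunk_years, from_year + (i + 1) * chunk_years - 1)
--             for i in range(n - 1)]
--     full.append((from_year + (n - 1) * chunk_years, to_year))
--     return full
-- ===== Notes on version B (the rewrite author's own statement) =====
-- stated objective: alternative
-- what changed: Computes the number of chunks up front by ceiling division, builds all full-size chunks by pure index arithmetic (no min, no threaded state), and appends the final partial chunk ending at to_year separately.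
import Mathlib
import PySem

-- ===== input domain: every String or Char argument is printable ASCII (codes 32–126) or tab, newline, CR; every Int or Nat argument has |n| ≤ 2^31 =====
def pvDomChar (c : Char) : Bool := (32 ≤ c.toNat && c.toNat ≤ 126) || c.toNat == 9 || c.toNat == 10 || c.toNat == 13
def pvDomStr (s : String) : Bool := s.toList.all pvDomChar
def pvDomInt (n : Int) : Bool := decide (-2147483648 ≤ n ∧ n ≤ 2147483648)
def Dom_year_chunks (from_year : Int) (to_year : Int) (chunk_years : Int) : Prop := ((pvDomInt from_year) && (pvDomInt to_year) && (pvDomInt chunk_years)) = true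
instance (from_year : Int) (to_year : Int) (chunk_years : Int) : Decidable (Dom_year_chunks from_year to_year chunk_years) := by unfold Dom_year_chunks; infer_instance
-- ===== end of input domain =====

-- B computes the chunk count up front by ceiling division and builds the full-size chunks
-- by index arithmetic, appending the final chunk ending at to_year; objective: alternative.


-- ===== PORT A =====
-- the while loop of A; the `chunk_years ≤ 0` branch is only a totality guard
-- (Python raises ValueError before reaching the loop in that case; excluded by Pre_)
def year_chunksLoop (to_year chunk_years : Int) (start : Int) (chunks : List (Int × Int)) :
    List (Int × Int) :=
  if hc : chunk_years ≤ 0 then chunks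
  else if h : start ≤ to_year then
    year_chunksLoop to_year chunk_years (min (start + chunk_years - 1) to_year + 1)
      (chunks ++ [(start, min (start + chunk_years - 1) to_year)])
  else chunks
termination_by (to_year + 1 - start).toNat
decreasing_by
  simp only [not_le] at hc
  omega

def year_chunks (from_year : Int) (to_year : Int) (chunk_years : Int) : List (Int × Int) :=
  year_chunksLoop to_year chunk_years from_year []

-- ===== PORT B =====
def year_chunks_alt (from_year : Int) (to_year : Int) (chunk_years : Int) : List (Int × Int) :=
  let total := to_year - from_year + 1
  if total ≤ 0 then []
  else
    let n := -(PySem.Int.floordiv (-total) chunk_years)   -- ceiling division -(-total // k)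
    ((List.range (n - 1).toNat).map
        (fun (i : Nat) => (from_year + (i : Int) * chunk_years,
                   from_year + ((i : Int) + 1) * chunk_years - 1)))
      ++ [(from_year + (n - 1) * chunk_years, to_year)]

-- ===== PRECONDITION & SPEC =====
-- Pre_ excludes chunk_years ≤ 0, on which the Python A (and B) raises ValueError.
def Pre_year_chunks (from_year : Int) (to_year : Int) (chunk_years : Int) : Prop :=
  0 < chunk_years
instance (from_year : Int) (to_year : Int) (chunk_years : Int) : Decidable (Pre_year_chunks from_year to_year chunk_years) := by unfold Pre_year_chunks; infer_instance

def pvWitness_year_chunks : Int × Int × Int := (2000, 2010, 3)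

def Spec_year_chunks (from_year : Int) (to_year : Int) (chunk_years : Int) (out : List (Int × Int)) : Prop := out = year_chunks_alt from_year to_year chunk_years
instance (from_year : Int) (to_year : Int) (chunk_years : Int) (out : List (Int × Int)) : Decidable (Spec_year_chunks from_year to_year chunk_years out) := by unfold Spec_year_chunks; infer_instance

-- ===== CLAIM (what is proved, stated in full; the proofs are below) =====
def Claim_equal_year_chunks : Prop := ∀ (from_year : Int) (to_year : Int) (chunk_years : Int), Dom_year_chunks from_year to_year chunk_years → Pre_year_chunks from_year to_year chunk_years → Spec_year_chunks from_year to_year chunk_years (year_chunks from_year to_year chunk_years)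

-- ===== LEMMAS AND PROOFS =====
-- ceiling bracket: n = ⌈T / k⌉ satisfies (n-1)k < T ≤ nk (k > 0)
theorem ceil_bracket {T k : Int} (hk : 0 < k) :
    (-(PySem.Int.floordiv (-T) k) - 1) * k < T ∧ T ≤ -(PySem.Int.floordiv (-T) k) * k :=
  (PySem.Int.neg_floordiv_neg_eq_iff_of_pos hk).mp rfl

-- the bracket determines n uniquely
theorem ceil_unique {T k n m : Int} (hk : 0 < k)
    (h1 : (n - 1) * k < T) (h2 : T ≤ n * k) (h3 : (m - 1) * k < T) (h4 : T ≤ m * k) :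
    n = m := by
  by_contra hne
  rcases lt_or_gt_of_ne hne with h | h
  · have : n * k ≤ (m - 1) * k := mul_le_mul_of_nonneg_right (by omega) (le_of_lt hk)
    omega
  · have : m * k ≤ (n - 1) * k := mul_le_mul_of_nonneg_right (by omega) (le_of_lt hk)
    omega

-- A's loop, started at `start` with accumulator `acc`, produces acc ++ B's chunks from `start`.
theorem loop_eq (t k : Int) (hk : 0 < k) (start : Int) (acc : List (Int × Int)) :
    year_chunksLoop t k start acc = acc ++ year_chunks_alt start t k := by
  rw [year_chunksLoop, dif_neg (by omega : ¬ k ≤ 0)]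
  by_cases h : start ≤ t
  · rw [dif_pos h]
    -- chunk count n for the remaining range [start, t]
    set T := t - start + 1 with hT
    obtain ⟨hb1, hb2⟩ := ceil_bracket (T := T) hk
    set n := -(PySem.Int.floordiv (-T) k) with hn
    by_cases hfull : start + k - 1 < t
    · -- full first chunk; recurse from start + k
      have hmin : min (start + k - 1) t = start + k - 1 := by omega
      rw [hmin, loop_eq t k hk (start + k - 1 + 1) (acc ++ [(start, start + k - 1)])]
      have hstep : start + k - 1 + 1 = start + k := by ring
      rw [hstep]
      -- characterize n' for the tail
      set T' := t - (start + k) + 1 with hT'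
      obtain ⟨hb1', hb2'⟩ := ceil_bracket (T := T') hk
      set n' := -(PySem.Int.floordiv (-T') k) with hn'
      have hTT' : T' = T - k := by omega
      have hn'n : n' = n - 1 := by
        apply ceil_unique hk hb1' hb2' <;> [skip; skip] <;>
          · rw [hTT']; nlinarith [hb1, hb2]
      -- unfold both sides of B
      have hTpos : ¬ T ≤ 0 := by omega
      have hT'pos : ¬ T' ≤ 0 := by nlinarith [hb1]
      unfold year_chunks_alt
      simp only [← hT, ← hT', ← hn, ← hn', if_neg hTpos, if_neg hT'pos]
      have hn2 : 2 ≤ n := by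
        by_contra hlt
        have : n * k ≤ 1 * k := mul_le_mul_of_nonneg_right (by omega) (le_of_lt hk)
        omega
      have hrange : (n - 1).toNat = (n' - 1).toNat + 1 := by omega
      rw [hrange, List.range_succ_eq_map, List.map_cons, List.map_map]
      simp only [List.append_assoc, List.cons_append, List.nil_append]
      congr 1
      · simp [Prod.ext_iff]
        exact ⟨fun a _ => ⟨by ring, by ring⟩, by rw [hn'n]; ring⟩
    · -- last (possibly partial) chunk: n = 1
      have hmin : min (start + k - 1) t = t := by omega
      rw [hmin, loop_eq t k hk (t + 1) (acc ++ [(start, t)])]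
      have hn1 : n = 1 := by
        apply ceil_unique hk hb1 hb2 <;> simp <;> omega
      unfold year_chunks_alt
      have hTpos : ¬ T ≤ 0 := by omega
      have hT2 : t - (t + 1) + 1 ≤ 0 := by omega
      simp only [← hT, ← hn, if_neg hTpos, if_pos hT2, hn1]
      simp
  · rw [dif_neg h]
    unfold year_chunks_alt
    rw [if_pos (by omega : t - start + 1 ≤ 0)]
    simp
termination_by (t + 1 - start).toNat
decreasing_by all_goals omega

-- ===== VERDICT (by name: the statement is the Claim_ definition above) =====
theorem year_chunks_spec : Claim_equal_year_chunks := by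
  intro f t k _ hk
  unfold Spec_year_chunks year_chunks
  rw [loop_eq t k hk f []]
  simp
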